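-- pv_equiv track=rewrite | github.com/typesAreSpaces/AXDInterpolator | tests/benchmark/results/extract-results.py | makeTableEntry
-- ===== SOURCE A (Python) =====
-- def makeTableEntry(entry):
--     num_success = 0
--     if('0' in entry):
--         num_success += entry['0']
--     num_failed = 0
--     for exit_code in entry:
--         if(exit_code != '0' and exit_code != '152'):
--             num_failed += entry[exit_code]
--     num_timeout = 0
--     if('152' in entry):
--         num_timeout += entry['152']
--     return (num_success, num_failed, num_timeout)
-- ===== SOURCE B (Python) =====
-- def makeTableEntry(entry):
--     total = sum(entry.values())
--     num_success = entry.get('0', 0)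
--     num_timeout = entry.get('152', 0)
--     return (num_success, total - num_success - num_timeout, num_timeout)
-- ===== Notes on version B (the rewrite author's own statement) =====
-- stated objective: simpler
-- what changed: Replaces the per-key filtering loop (and the two membership-guarded additions) by one total sum of all values plus two dict.get lookups, deriving num_failed as the arithmetic complement total - success - timeout.
import Mathlib
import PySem

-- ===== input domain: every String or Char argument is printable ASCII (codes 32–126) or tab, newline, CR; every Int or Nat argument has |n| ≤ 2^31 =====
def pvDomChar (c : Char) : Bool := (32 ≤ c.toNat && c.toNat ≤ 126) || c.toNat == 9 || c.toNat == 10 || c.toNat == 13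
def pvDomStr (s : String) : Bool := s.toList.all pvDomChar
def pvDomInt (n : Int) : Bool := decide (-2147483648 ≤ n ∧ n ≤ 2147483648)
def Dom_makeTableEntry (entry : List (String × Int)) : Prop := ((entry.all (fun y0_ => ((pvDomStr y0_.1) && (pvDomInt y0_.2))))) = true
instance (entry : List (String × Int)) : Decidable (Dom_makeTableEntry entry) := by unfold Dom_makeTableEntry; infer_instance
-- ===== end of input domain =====

-- B replaces A's per-key filtering loop by a total value sum plus two lookups,
-- computing num_failed as the arithmetic complement (objective: simpler).

-- ===== PORT A =====
def makeTableEntry (entry : List (String × Int)) : Int × Int × Int :=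
  let d := PySem.Dict.mk entry
  let num_success : Int := if d.contains "0" then 0 + d.getD "0" 0 else 0
  let num_failed : Int :=
    d.keys.foldl (fun acc exit_code =>
      if exit_code ≠ "0" ∧ exit_code ≠ "152" then acc + d.getD exit_code 0 else acc) 0
  let num_timeout : Int := if d.contains "152" then 0 + d.getD "152" 0 else 0
  (num_success, num_failed, num_timeout)

-- ===== PORT B =====
def makeTableEntry_alt (entry : List (String × Int)) : Int × Int × Int :=
  let d := PySem.Dict.mk entry
  let total : Int := d.values.sum
  let num_success : Int := d.getD "0" 0
  let num_timeout : Int := d.getD "152" 0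
  (num_success, total - num_success - num_timeout, num_timeout)

-- ===== PRECONDITION & SPEC =====
-- Pre_ excludes association lists with duplicate keys: they do not represent any Python
-- dict (A's parameter type), so the dict semantics there is purely an artefact of the encoding.
def Pre_makeTableEntry (entry : List (String × Int)) : Prop := (entry.map Prod.fst).Nodup
instance (entry : List (String × Int)) : Decidable (Pre_makeTableEntry entry) := by
  unfold Pre_makeTableEntry; infer_instance

def pvWitness_makeTableEntry : (List (String × Int)) := [("0", 3), ("1", 5), ("152", 2)]

def Spec_makeTableEntry (entry : List (String × Int)) (out : Int × Int × Int) : Prop := out = makeTableEntry_alt entry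
instance (entry : List (String × Int)) (out : Int × Int × Int) : Decidable (Spec_makeTableEntry entry out) := by unfold Spec_makeTableEntry; infer_instance

-- ===== CLAIM (what is proved, stated in full; the proofs are below) =====
def Claim_equal_makeTableEntry : Prop := ∀ (entry : List (String × Int)), Dom_makeTableEntry entry → Pre_makeTableEntry entry → Spec_makeTableEntry entry (makeTableEntry entry)

-- ===== LEMMAS AND PROOFS =====

-- A's failed-loop over a duplicate-free key list, in closed form.
theorem foldl_filter_sum (l : List String) (g : String → Int) (hl : l.Nodup) (a : Int) :
    l.foldl (fun acc k => if k ≠ "0" ∧ k ≠ "152" then acc + g k else acc) a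
      = a + (l.map g).sum
          - (if "0" ∈ l then g "0" else 0) - (if "152" ∈ l then g "152" else 0) := by
  induction l generalizing a with
  | nil => simp
  | cons k t ih =>
    rcases List.nodup_cons.mp hl with ⟨hk, ht⟩
    simp only [List.foldl_cons, List.map_cons, List.sum_cons, List.mem_cons]
    rw [ih ht]
    by_cases h0 : "0" = k
    · by_cases h152 : "152" = k
      · exact absurd (h0.trans h152.symm) (by decide)
      · subst h0
        by_cases m152 : "152" ∈ t <;> simp_all <;> ring
    · by_cases h152 : "152" = k
      · subst h152
        by_cases m0 : "0" ∈ t <;> simp_all <;> ring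
      · have h0' : ¬ k = "0" := fun h => h0 h.symm
        have h152' : ¬ k = "152" := fun h => h152 h.symm
        by_cases m0 : "0" ∈ t <;> by_cases m152 : "152" ∈ t <;>
          simp_all <;> ring

-- ===== VERDICT (by name: the statement is the Claim_ definition above) =====
theorem makeTableEntry_spec : Claim_equal_makeTableEntry := by
  intro entry _ hpre
  unfold Spec_makeTableEntry makeTableEntry makeTableEntry_alt
  set d := PySem.Dict.mk entry with hd
  have hnd : d.keys.Nodup := by simpa [hd, PySem.Dict.keys] using hpre
  have hc0 := PySem.Dict.contains_eq_decide_mem_keys (d := d) (k := "0")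
  have hc152 := PySem.Dict.contains_eq_decide_mem_keys (d := d) (k := "152")
  have hg0 : ¬ "0" ∈ d.keys → d.getD "0" 0 = 0 := by
    intro h
    exact PySem.Dict.getD_of_not_contains d 0 (by rw [hc0]; simpa using h)
  have hg152 : ¬ "152" ∈ d.keys → d.getD "152" 0 = 0 := by
    intro h
    exact PySem.Dict.getD_of_not_contains d 0 (by rw [hc152]; simpa using h)
  have hv : d.values = d.keys.map (fun k => d.getD k 0) :=
    PySem.Dict.values_eq_map_keys d hnd 0
  have hfold := foldl_filter_sum d.keys (fun k => d.getD k 0) hnd 0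
  simp only [hv, hfold, hc0, hc152]
  by_cases m0 : "0" ∈ d.keys <;> by_cases m152 : "152" ∈ d.keys <;>
    simp [m0, m152, hg0, hg152]
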